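-- pv_equiv track=rewrite | github.com/aaronlael/AdventOfCode2022 | day12.py | step
-- ===== SOURCE A (Python) =====
-- ALPHA = "SabcdefghijklmnopqrstuvwxyzE"
--
-- def step(stepcount: int, bfsmatrix: list, inp: list) -> list:
--     for y in range(len(bfsmatrix)):
--         for x in range(len(bfsmatrix[y])):
--             if bfsmatrix[y][x] == stepcount:
--                 for offset in [(1, 0), (0, 1), (-1, 0), (0, -1)]:
--                     if 0 <= y + offset[0] <= len(bfsmatrix) - 1 and 0 <= x + offset[1] <= len(bfsmatrix[y]) - 1 and bfsmatrix[y+offset[0]][x+offset[1]] == 0: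
--                         if ALPHA.find(inp[y+offset[0]][x+offset[1]]) - ALPHA.find(inp[y][x]) <= 1:
--                             bfsmatrix[y+offset[0]][x+offset[1]] = stepcount + 1
--     return bfsmatrix
-- ===== SOURCE B (Python) =====
-- ALPHA = "SabcdefghijklmnopqrstuvwxyzE"
--
-- OFFSETS = ((1, 0), (0, 1), (-1, 0), (0, -1))
--
-- def step(stepcount: int, bfsmatrix: list, inp: list) -> list:
--     # "Pull" formulation: compute each cell's new value from the ORIGINAL matrix
--     # (a zero cell becomes stepcount+1 if some in-bounds neighbour carries stepcount
--     # and the elevation rule allows the move), then write the rows back in place.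
--     h = len(bfsmatrix)
--     new_rows = []
--     for y in range(h):
--         row = bfsmatrix[y]
--         new_row = []
--         for x in range(len(row)):
--             v = row[x]
--             if v == 0 and any(
--                 0 <= y + dy < h
--                 and 0 <= x + dx < len(bfsmatrix[y + dy])
--                 and bfsmatrix[y + dy][x + dx] == stepcount
--                 and ALPHA.find(inp[y][x]) - ALPHA.find(inp[y + dy][x + dx]) <= 1
--                 for dy, dx in OFFSETS
--             ):
--                 new_row.append(stepcount + 1)
--             else:
--                 new_row.append(v)
--         new_rows.append(new_row)
--     for y in range(h):
--         bfsmatrix[y][:] = new_rows[y]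
--     return bfsmatrix
-- ===== Notes on version B (the rewrite author's own statement) =====
-- stated objective: alternative
-- what changed: B replaces A's in-place frontier-push scan (writing stepcount+1 into the neighbours of each frontier cell while mutating the matrix mid-scan) by a per-cell pull: every zero cell is recomputed from the original matrix by checking whether some in-bounds neighbour holds stepcount under the elevation rule, the new rows are built functionally and then written back in place.
-- outside the precondition, e.g. on step(0, [[0, 0]], [['a', 'a']]): A returns [[0, 1]], B returns [[1, 1]]; on step(5, [[5, 0], [1, 5]], [['S', 'a', 'S']]): A returns [[5, 6], [1, 5]], B raises IndexError
import Mathlib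
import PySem

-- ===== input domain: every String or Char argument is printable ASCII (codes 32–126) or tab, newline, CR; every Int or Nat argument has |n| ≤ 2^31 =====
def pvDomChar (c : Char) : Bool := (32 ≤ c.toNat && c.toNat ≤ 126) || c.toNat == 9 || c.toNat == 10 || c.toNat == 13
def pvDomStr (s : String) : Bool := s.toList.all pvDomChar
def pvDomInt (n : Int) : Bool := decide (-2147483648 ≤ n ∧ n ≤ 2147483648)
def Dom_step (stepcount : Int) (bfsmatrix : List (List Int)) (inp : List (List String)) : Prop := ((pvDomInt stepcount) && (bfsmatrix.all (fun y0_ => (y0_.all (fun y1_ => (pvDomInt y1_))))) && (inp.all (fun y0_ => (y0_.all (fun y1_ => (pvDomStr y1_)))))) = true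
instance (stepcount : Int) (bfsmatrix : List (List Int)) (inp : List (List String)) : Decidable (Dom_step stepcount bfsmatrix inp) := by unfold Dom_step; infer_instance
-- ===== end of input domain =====

-- B replaces A's in-place frontier-push scan by a per-cell pull from the original matrix
-- (alternative decomposition, same cost); equivalence is about the returned value, and B's
-- write-back leaves the mutated argument in the same final state as A on every Pre_ input.

-- ===== PORT A =====
def pvAlpha : String := "SabcdefghijklmnopqrstuvwxyzE"

def pvOffsets : List (Int × Int) := [(1, 0), (0, 1), (-1, 0), (0, -1)]

-- bfsmatrix[y] (Int index; out-of-range reads default to [] — Python raises there, outside Pre_)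
def pvRowA (m : List (List Int)) (y : Int) : List Int := (PySem.List.pyGet? m y).getD []

-- bfsmatrix[y][x]
def pvCellA (m : List (List Int)) (y x : Int) : Int := (PySem.List.pyGet? (pvRowA m y) x).getD 0

-- inp[y][x]
def pvStrA (inp : List (List String)) (y x : Int) : String :=
  (PySem.List.pyGet? ((PySem.List.pyGet? inp y).getD []) x).getD ""

-- bfsmatrix[y][x] = v (in-place item assignment; out-of-range is a no-op — Python raises there, outside Pre_)
def pvWriteA (m : List (List Int)) (y x : Int) (v : Int) : List (List Int) :=
  m.set y.toNat ((pvRowA m y).set x.toNat v)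

def step (stepcount : Int) (bfsmatrix : List (List Int)) (inp : List (List String)) : List (List Int) :=
  (List.range bfsmatrix.length).foldl (fun m1 (y : Nat) =>
    (List.range (pvRowA m1 (y : Int)).length).foldl (fun m2 (x : Nat) =>
      if pvCellA m2 (y : Int) (x : Int) = stepcount then
        pvOffsets.foldl (fun m3 off =>
          if 0 ≤ (y : Int) + off.1 ∧ (y : Int) + off.1 ≤ (m3.length : Int) - 1 ∧
             0 ≤ (x : Int) + off.2 ∧ (x : Int) + off.2 ≤ ((pvRowA m3 (y : Int)).length : Int) - 1 ∧
             pvCellA m3 ((y : Int) + off.1) ((x : Int) + off.2) = 0 then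
            if PySem.Str.find pvAlpha (pvStrA inp ((y : Int) + off.1) ((x : Int) + off.2)) -
               PySem.Str.find pvAlpha (pvStrA inp (y : Int) (x : Int)) ≤ 1 then
              pvWriteA m3 ((y : Int) + off.1) ((x : Int) + off.2) (stepcount + 1)
            else m3
          else m3) m2
      else m2) m1) bfsmatrix

-- ===== PORT B =====
-- inp[y][x] on B's side (Nat indices; defaults where Python would raise, outside Pre_)
def pvStrB (inp : List (List String)) (y x : Nat) : String := (inp.getD y []).getD x ""

def step_alt (stepcount : Int) (bfsmatrix : List (List Int)) (inp : List (List String)) : List (List Int) :=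
  (List.range bfsmatrix.length).map (fun (y : Nat) =>
    let row := bfsmatrix.getD y []
    (List.range row.length).map (fun (x : Nat) =>
      let v := row.getD x 0
      if v = 0 ∧ pvOffsets.any (fun off =>
            decide (0 ≤ (y : Int) + off.1) && decide ((y : Int) + off.1 < (bfsmatrix.length : Int)) &&
            decide (0 ≤ (x : Int) + off.2) &&
            decide ((x : Int) + off.2 < ((bfsmatrix.getD ((y : Int) + off.1).toNat []).length : Int)) &&
            decide ((bfsmatrix.getD ((y : Int) + off.1).toNat []).getD ((x : Int) + off.2).toNat 0 = stepcount) &&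
            decide (PySem.Str.find pvAlpha (pvStrB inp y x) -
                    PySem.Str.find pvAlpha (pvStrB inp ((y : Int) + off.1).toNat ((x : Int) + off.2).toNat) ≤ 1))
      then stepcount + 1 else v))

-- ===== PRECONDITION & SPEC =====
-- Pre_ excludes stepcount = 0, where the frontier marker coincides with the unvisited sentinel 0 so the
-- result depends on A's accidental in-pass scan order, and inputs whose frontier neighbourhood reaches past
-- a shorter matrix row or past inp (A raises IndexError there, except when an earlier in-pass overwrite
-- shadows the inp access, in which case B raises instead).
def Pre_step (stepcount : Int) (bfsmatrix : List (List Int)) (inp : List (List String)) : Prop :=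
  stepcount ≠ 0 ∧
  ((List.range bfsmatrix.length).all fun y =>
    (List.range (bfsmatrix.getD y []).length).all fun x =>
      !((bfsmatrix.getD y []).getD x 0 == stepcount) ||
      (([(1, 0), (0, 1), (-1, 0), (0, -1)] : List (Int × Int)).all fun off =>
        !(decide (0 ≤ (y : Int) + off.1) && decide ((y : Int) + off.1 < (bfsmatrix.length : Int)) &&
          decide (0 ≤ (x : Int) + off.2) && decide ((x : Int) + off.2 < ((bfsmatrix.getD y []).length : Int))) ||
        (decide ((x : Int) + off.2 < ((bfsmatrix.getD ((y : Int) + off.1).toNat []).length : Int)) &&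
         (!((bfsmatrix.getD ((y : Int) + off.1).toNat []).getD ((x : Int) + off.2).toNat 0 == 0) ||
          (decide ((y : Int) + off.1 < (inp.length : Int)) &&
           decide ((x : Int) + off.2 < ((inp.getD ((y : Int) + off.1).toNat []).length : Int)) &&
           decide (y < inp.length) && decide (x < (inp.getD y []).length)))))) = true

instance (stepcount : Int) (bfsmatrix : List (List Int)) (inp : List (List String)) : Decidable (Pre_step stepcount bfsmatrix inp) := by unfold Pre_step; infer_instance

def pvWitness_step : Int × List (List Int) × List (List String) := (1, [[1, 0]], [["a", "b"]])

def Spec_step (stepcount : Int) (bfsmatrix : List (List Int)) (inp : List (List String)) (out : List (List Int)) : Prop := out = step_alt stepcount bfsmatrix inp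
instance (stepcount : Int) (bfsmatrix : List (List Int)) (inp : List (List String)) (out : List (List Int)) : Decidable (Spec_step stepcount bfsmatrix inp out) := by unfold Spec_step; infer_instance

-- ===== CLAIM (what is proved, stated in full; the proofs are below) =====
def Claim_equal_step : Prop := ∀ (stepcount : Int) (bfsmatrix : List (List Int)) (inp : List (List String)), Dom_step stepcount bfsmatrix inp → Pre_step stepcount bfsmatrix inp → Spec_step stepcount bfsmatrix inp (step stepcount bfsmatrix inp)

-- ===== LEMMAS AND PROOFS =====

-- proof-side total accessors (Nat indices)
def gv (m : List (List Int)) (y x : Nat) : Int := (m.getD y []).getD x 0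
def rl (m : List (List Int)) (y : Nat) : Nat := (m.getD y []).length
def gs (inp : List (List String)) (y x : Nat) : String := (inp.getD y []).getD x ""

-- elevation rule, pulled at target c from source d
def elevOK (inp : List (List String)) (cy cx dy dx : Nat) : Bool :=
  PySem.Str.find pvAlpha (gs inp cy cx) - PySem.Str.find pvAlpha (gs inp dy dx) ≤ 1

-- "processing frontier cell d with offset o writes (stepcount+1) at c" — all data from the ORIGINAL matrix
def wAt (sc : Int) (m0 : List (List Int)) (inp : List (List String))
    (p : (Nat × Nat) × (Int × Int)) (c : Nat × Nat) : Bool :=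
  (gv m0 p.1.1 p.1.2 == sc) &&
  ((p.1.1 : Int) + p.2.1 == (c.1 : Int)) && ((p.1.2 : Int) + p.2.2 == (c.2 : Int)) &&
  decide (c.1 < m0.length) && decide ((c.2 : Int) < (rl m0 p.1.1 : Int)) &&
  elevOK inp c.1 c.2 p.1.1 p.1.2

def pval (sc : Int) (m0 : List (List Int)) (inp : List (List String))
    (Q : List ((Nat × Nat) × (Int × Int))) (c : Nat × Nat) : Int :=
  if gv m0 c.1 c.2 = 0 ∧ Q.any (fun p => wAt sc m0 inp p c) then sc + 1 else gv m0 c.1 c.2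

def shapeEq (m m0 : List (List Int)) : Prop := m.length = m0.length ∧ ∀ y, rl m y = rl m0 y

def LoopInv (sc : Int) (m0 : List (List Int)) (inp : List (List String))
    (Q : List ((Nat × Nat) × (Int × Int))) (m : List (List Int)) : Prop :=
  shapeEq m m0 ∧ ∀ y x, y < m0.length → x < rl m0 y → gv m y x = pval sc m0 inp Q (y, x)

def pairsOf (d : Nat × Nat) : List ((Nat × Nat) × (Int × Int)) := pvOffsets.map (fun o => (d, o))

def Qall (m0 : List (List Int)) : List ((Nat × Nat) × (Int × Int)) :=
  (List.range m0.length).flatMap (fun y => (List.range (rl m0 y)).flatMap (fun x => pairsOf (y, x)))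

-- A's loop bodies, named for the proof (definitionally the lambdas inside `step`)
def offBody (sc : Int) (inp : List (List String)) (y x : Nat)
    (m : List (List Int)) (off : Int × Int) : List (List Int) :=
  if 0 ≤ (y : Int) + off.1 ∧ (y : Int) + off.1 ≤ (m.length : Int) - 1 ∧
     0 ≤ (x : Int) + off.2 ∧ (x : Int) + off.2 ≤ ((pvRowA m (y : Int)).length : Int) - 1 ∧
     pvCellA m ((y : Int) + off.1) ((x : Int) + off.2) = 0 then
    if PySem.Str.find pvAlpha (pvStrA inp ((y : Int) + off.1) ((x : Int) + off.2)) -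
       PySem.Str.find pvAlpha (pvStrA inp (y : Int) (x : Int)) ≤ 1 then
      pvWriteA m ((y : Int) + off.1) ((x : Int) + off.2) (sc + 1)
    else m
  else m

def cellBody (sc : Int) (inp : List (List String)) (y x : Nat) (m : List (List Int)) : List (List Int) :=
  if pvCellA m (y : Int) (x : Int) = sc then pvOffsets.foldl (offBody sc inp y x) m else m

def rowBody (sc : Int) (inp : List (List String)) (y : Nat) (m : List (List Int)) : List (List Int) :=
  (List.range (pvRowA m (y : Int)).length).foldl (fun m2 x => cellBody sc inp y x m2) m

theorem step_eq_folds (sc : Int) (m : List (List Int)) (inp : List (List String)) :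
    step sc m inp = (List.range m.length).foldl (fun m1 y => rowBody sc inp y m1) m := by
  unfold step rowBody cellBody offBody
  rfl

-- getD after set, in one lemma
theorem getD_set {α : Type} (l : List α) (i n : Nat) (a d : α) :
    (l.set i a).getD n d = if i = n ∧ i < l.length then a else l.getD n d := by
  by_cases e : i = n
  · subst e
    by_cases hl : i < l.length
    · rw [if_pos ⟨rfl, hl⟩]
      simp [List.getD_eq_getElem?_getD, hl]
    · rw [if_neg (fun h => hl h.2)]
      simp [List.getD_eq_getElem?_getD, hl]
  · rw [if_neg (fun h => e h.1)]
    simp [List.getD_eq_getElem?_getD, e]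

-- bridging lemmas between the Int-indexed port accessors and the Nat-indexed proof accessors
theorem pvRowA_nonneg (m : List (List Int)) (i : Int) (h : 0 ≤ i) :
    pvRowA m i = m.getD i.toNat [] := by
  rw [pvRowA, PySem.List.pyGet?_of_nonneg _ h, List.getD_eq_getElem?_getD]

theorem pvRowA_natCast (m : List (List Int)) (y : Nat) : pvRowA m (y : Int) = m.getD y [] := by
  rw [pvRowA_nonneg m _ (by omega)]; simp

theorem pvCellA_nonneg (m : List (List Int)) (y x : Int) (hy : 0 ≤ y) (hx : 0 ≤ x) :
    pvCellA m y x = gv m y.toNat x.toNat := by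
  rw [pvCellA, pvRowA_nonneg m y hy, PySem.List.pyGet?_of_nonneg _ hx, gv]
  simp [List.getD_eq_getElem?_getD]

theorem pvCellA_natCast (m : List (List Int)) (y x : Nat) :
    pvCellA m (y : Int) (x : Int) = gv m y x := by
  rw [pvCellA_nonneg m _ _ (by omega) (by omega)]; simp

theorem pvStrA_nonneg (inp : List (List String)) (y x : Int) (hy : 0 ≤ y) (hx : 0 ≤ x) :
    pvStrA inp y x = gs inp y.toNat x.toNat := by
  rw [pvStrA, PySem.List.pyGet?_of_nonneg _ hy, PySem.List.pyGet?_of_nonneg _ hx, gs,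
      List.getD_eq_getElem?_getD, List.getD_eq_getElem?_getD]

theorem pvStrB_eq_gs (inp : List (List String)) (y x : Nat) : pvStrB inp y x = gs inp y x := rfl

-- shape of a write
theorem length_write (m : List (List Int)) (y x v) : (pvWriteA m y x v).length = m.length := by
  simp [pvWriteA]

theorem rl_write (m : List (List Int)) (i j : Int) (v : Int) (h : 0 ≤ i) :
    ∀ y, rl (pvWriteA m i j v) y = rl m y := by
  intro y
  unfold pvWriteA rl
  rw [pvRowA_nonneg m i h, getD_set]
  split_ifs with h1
  · rw [List.length_set, h1.1]
  · rfl

theorem shapeEq_write (m m0 : List (List Int)) (i j : Int) (v : Int) (h : 0 ≤ i)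
    (hs : shapeEq m m0) : shapeEq (pvWriteA m i j v) m0 :=
  ⟨by rw [length_write, hs.1], fun y => by rw [rl_write m i j v h, hs.2]⟩

-- reading after a write
theorem gv_write_same (m : List (List Int)) (i j : Int) (v : Int) (hi : 0 ≤ i)
    (h1 : i.toNat < m.length) (h2 : j.toNat < rl m i.toNat) :
    gv (pvWriteA m i j v) i.toNat j.toNat = v := by
  unfold pvWriteA gv
  rw [pvRowA_nonneg m i hi, getD_set, if_pos ⟨rfl, h1⟩, getD_set,
      if_pos ⟨rfl, by unfold rl at h2; exact h2⟩]

theorem gv_write_other (m : List (List Int)) (i j : Int) (v : Int) (hi : 0 ≤ i) (y x : Nat)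
    (hne : ¬(y = i.toNat ∧ x = j.toNat)) :
    gv (pvWriteA m i j v) y x = gv m y x := by
  unfold pvWriteA gv
  rw [pvRowA_nonneg m i hi, getD_set]
  split_ifs with hy
  · obtain ⟨e, _⟩ := hy; subst e
    rw [getD_set]
    split_ifs with hx
    · exact absurd ⟨rfl, hx.1.symm⟩ hne
    · rfl
  · rfl

-- an out-of-row write is a no-op
theorem write_oob (m : List (List Int)) (i j : Int) (v : Int) (hi : 0 ≤ i)
    (hj : rl m i.toNat ≤ j.toNat) : pvWriteA m i j v = m := by
  unfold pvWriteA
  rw [pvRowA_nonneg m i hi]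
  have h0 : (m.getD i.toNat []).set j.toNat v = m.getD i.toNat [] :=
    List.set_eq_of_length_le (by unfold rl at hj; omega)
  rw [h0]
  by_cases hl : i.toNat < m.length
  · rw [List.getD_eq_getElem?_getD, List.getElem?_eq_getElem hl]
    exact List.set_getElem_self ..
  · exact List.set_eq_of_length_le (by omega)

-- facts about pval
theorem pval_eq_zero {sc : Int} {m0 : List (List Int)} {inp Q c}
    (h : pval sc m0 inp Q c = 0) : gv m0 c.1 c.2 = 0 := by
  unfold pval at h; split_ifs at h with hg
  · exact hg.1
  · exact h

theorem pval_frontier {sc : Int} (hsc : sc ≠ 0) (m0 : List (List Int)) (inp Q c) :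
    pval sc m0 inp Q c = sc ↔ gv m0 c.1 c.2 = sc := by
  unfold pval; split_ifs with hg
  · constructor
    · intro h; omega
    · intro h; rw [h] at hg; exact absurd hg.1 (by omega)
  · exact Iff.rfl

theorem wAt_parts {sc m0 inp p c} (h : wAt sc m0 inp p c = true) :
    gv m0 p.1.1 p.1.2 = sc ∧
    (p.1.1 : Int) + p.2.1 = (c.1 : Int) ∧ (p.1.2 : Int) + p.2.2 = (c.2 : Int) ∧
    c.1 < m0.length ∧ c.2 < rl m0 p.1.1 ∧ elevOK inp c.1 c.2 p.1.1 p.1.2 = true := by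
  unfold wAt at h; simp at h
  obtain ⟨⟨⟨⟨⟨h1, h2⟩, h3⟩, h4⟩, h5⟩, h6⟩ := h
  exact ⟨h1, h2, h3, h4, h5, h6⟩

theorem wAt_src {sc m0 inp p c} (h : wAt sc m0 inp p c = true) : gv m0 p.1.1 p.1.2 = sc :=
  (wAt_parts h).1

theorem wAt_coords {sc m0 inp p c} (h : wAt sc m0 inp p c = true) :
    (p.1.1 : Int) + p.2.1 = (c.1 : Int) ∧ (p.1.2 : Int) + p.2.2 = (c.2 : Int) ∧
    c.1 < m0.length ∧ c.2 < rl m0 p.1.1 ∧ elevOK inp c.1 c.2 p.1.1 p.1.2 = true :=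
  (wAt_parts h).2

-- extending Q with a pair that (where it could write at an in-range cell) is already accounted for
theorem pval_snoc_eq {sc : Int} {m0 : List (List Int)} {inp Q} (p) (c : Nat × Nat)
    (hF : wAt sc m0 inp p c = true → gv m0 c.1 c.2 = 0 →
          Q.any (fun q => wAt sc m0 inp q c) = true) :
    pval sc m0 inp (Q ++ [p]) c = pval sc m0 inp Q c := by
  by_cases hw : wAt sc m0 inp p c = true
  · by_cases hg : gv m0 c.1 c.2 = 0
    · have hQ := hF hw hg
      simp [pval, List.any_append, hQ, hg]
    · simp [pval, hg]
  · have hw2 : wAt sc m0 inp p c = false := by simpa using hw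
    have ha : ((Q ++ [p]).any fun q => wAt sc m0 inp q c) = (Q.any fun q => wAt sc m0 inp q c) := by
      simp [List.any_append, hw2]
    simp only [pval, ha]

theorem pval_append_eq {sc : Int} {m0 : List (List Int)} {inp Q} (Q') (c : Nat × Nat)
    (hF : ∀ p ∈ Q', wAt sc m0 inp p c = false) :
    pval sc m0 inp (Q ++ Q') c = pval sc m0 inp Q c := by
  have : Q'.any (fun q => wAt sc m0 inp q c) = false := by
    simp only [List.any_eq_false]
    intro p hp; simp [hF p hp]
  simp only [pval, List.any_append, this, Bool.or_false]

-- ===== the core step: one offset of one frontier cell preserves the invariant =====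
theorem off_step {sc : Int} {m0 m : List (List Int)} {inp : List (List String)}
    {Q : List ((Nat × Nat) × (Int × Int))} {y x : Nat} (off : Int × Int)
    (hf : gv m0 y x = sc) (hInv : LoopInv sc m0 inp Q m) :
    LoopInv sc m0 inp (Q ++ [((y, x), off)]) (offBody sc inp y x m off) := by
  obtain ⟨hsh, hpt⟩ := hInv
  have hlen : m.length = m0.length := hsh.1
  have hrow : (pvRowA m (y : Int)).length = rl m0 y := by
    rw [pvRowA_natCast]; exact hsh.2 y
  unfold offBody
  set ny : Int := (y : Int) + off.1 with hny
  set nx : Int := (x : Int) + off.2 with hnx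
  -- a general fact used in all no-write branches: if the new pair can write at an in-range cell,
  -- that cell is the target
  have htarget : ∀ c : Nat × Nat, wAt sc m0 inp ((y, x), off) c = true →
      (c.1 : Int) = ny ∧ (c.2 : Int) = nx := by
    intro c hw
    obtain ⟨h1, h2, _, _, _⟩ := wAt_coords hw
    dsimp only at h1 h2
    exact ⟨h1.symm, h2.symm⟩
  split_ifs with hb helev
  · -- bounds ok and elevation ok: a write happens
    obtain ⟨hb1, hb2, hb3, hb4, hb0⟩ := hb
    rw [hrow] at hb4
    rw [hlen] at hb2
    have hcell : pvCellA m ny nx = gv m ny.toNat nx.toNat := pvCellA_nonneg m ny nx hb1 hb3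
    by_cases hin : nx.toNat < rl m0 ny.toNat
    · -- target is a real cell
      have htin : ny.toNat < m0.length := by omega
      have hg0 : gv m0 ny.toNat nx.toNat = 0 := by
        have := hpt ny.toNat nx.toNat htin hin
        rw [hcell] at hb0; rw [hb0] at this
        exact pval_eq_zero this.symm
      have hwt : wAt sc m0 inp ((y, x), off) (ny.toNat, nx.toNat) = true := by
        unfold wAt
        simp only [Bool.and_eq_true, beq_iff_eq, decide_eq_true_eq]
        refine ⟨⟨⟨⟨⟨hf, by omega⟩, by omega⟩, htin⟩, by omega⟩, ?_⟩
        have he : pvStrA inp ny nx = gs inp ny.toNat nx.toNat := pvStrA_nonneg inp ny nx hb1 hb3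
        have he2 : pvStrA inp (y : Int) (x : Int) = gs inp y x := by
          rw [pvStrA_nonneg inp _ _ (by omega) (by omega)]; simp
        rw [he, he2] at helev
        unfold elevOK; exact decide_eq_true helev
      constructor
      · exact shapeEq_write m m0 ny nx (sc + 1) hb1 hsh
      · intro y' x' h1 h2
        by_cases hc : y' = ny.toNat ∧ x' = nx.toNat
        · obtain ⟨e1, e2⟩ := hc; subst e1; subst e2
          rw [gv_write_same m ny nx (sc + 1) hb1 (by omega) (by rw [hsh.2]; exact hin)]
          simp [pval, List.any_append, hwt, hg0]
        · rw [gv_write_other m ny nx (sc + 1) hb1 y' x' hc, hpt y' x' h1 h2]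
          symm
          apply pval_append_eq
          intro p hp; simp at hp; subst hp
          by_cases hw : wAt sc m0 inp ((y, x), off) (y', x') = true
          · obtain ⟨e1, e2⟩ := htarget _ hw
            exact absurd ⟨by omega, by omega⟩ hc
          · simpa using hw
    · -- target column is beyond its (shorter) row: the write is a no-op
      have hnoop : pvWriteA m ny nx (sc + 1) = m := by
        apply write_oob m ny nx (sc + 1) hb1
        rw [hsh.2]; omega
      rw [hnoop]
      refine ⟨hsh, fun y' x' h1 h2 => ?_⟩
      rw [hpt y' x' h1 h2]
      symm
      apply pval_append_eq
      intro p hp; simp at hp; subst hp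
      by_cases hw : wAt sc m0 inp ((y, x), off) (y', x') = true
      · obtain ⟨e1, e2⟩ := htarget _ hw
        have e3 : y' = ny.toNat := by omega
        have e4 : x' = nx.toNat := by omega
        rw [e3, e4] at h2
        exact absurd h2 hin
      · simpa using hw
  · -- bounds ok, elevation fails: no write, and the new pair never fires
    refine ⟨hsh, fun y' x' h1 h2 => ?_⟩
    rw [hpt y' x' h1 h2]
    symm
    apply pval_append_eq
    intro p hp; simp at hp; subst hp
    by_cases hw : wAt sc m0 inp ((y, x), off) (y', x') = true
    · exfalso
      obtain ⟨hb1, hb2, hb3, hb4, hb0⟩ := hb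
      obtain ⟨e1, e2, _, _, hel⟩ := wAt_coords hw
      dsimp only at e1 e2 hel
      apply helev
      have he : pvStrA inp ny nx = gs inp ny.toNat nx.toNat := pvStrA_nonneg inp ny nx hb1 hb3
      have he2 : pvStrA inp (y : Int) (x : Int) = gs inp y x := by
        rw [pvStrA_nonneg inp _ _ (by omega) (by omega)]; simp
      rw [he, he2]
      have ha : ny.toNat = y' := by omega
      have hb' : nx.toNat = x' := by omega
      rw [ha, hb']
      unfold elevOK at hel
      exact of_decide_eq_true hel
    · simpa using hw
  · -- bounds (or the ==0 read) fail: no write; if the new pair could fire at an in-range cell,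
    -- that cell's current value is already nonzero, hence already written or never zero
    refine ⟨hsh, fun y' x' h1 h2 => ?_⟩
    rw [hpt y' x' h1 h2]
    symm
    apply pval_snoc_eq
    intro hw hg0
    obtain ⟨e1, e2, hc1, hc2, _⟩ := wAt_coords hw
    dsimp only at e1 e2 hc1 hc2
    have hb1 : 0 ≤ ny := by omega
    have hb3 : 0 ≤ nx := by omega
    have hcg : pvCellA m ny nx = gv m y' x' := by
      rw [pvCellA_nonneg m ny nx hb1 hb3]
      congr 1 <;> omega
    by_cases hq : List.any Q (fun q => wAt sc m0 inp q (y', x')) = true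
    · exact hq
    · exfalso
      apply hb
      rw [hrow, hlen]
      refine ⟨hb1, by omega, hb3, by omega, ?_⟩
      rw [hcg, hpt y' x' h1 h2]
      simp only [pval]
      rw [if_neg (by intro hcon; exact absurd hcon.2 (by simpa using hq))]
      exact hg0
  
theorem cell_step {sc : Int} {m0 m : List (List Int)} {inp : List (List String)}
    {Q : List ((Nat × Nat) × (Int × Int))} {y x : Nat}
    (hsc : sc ≠ 0) (hy : y < m0.length) (hx : x < rl m0 y)
    (hInv : LoopInv sc m0 inp Q m) :
    LoopInv sc m0 inp (Q ++ pairsOf (y, x)) (cellBody sc inp y x m) := by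
  obtain ⟨hsh, hpt⟩ := hInv
  unfold cellBody
  by_cases hfr : pvCellA m (y : Int) (x : Int) = sc
  · rw [if_pos hfr]
    have hf : gv m0 y x = sc := by
      rw [pvCellA_natCast, hpt y x hy hx] at hfr
      exact (pval_frontier hsc m0 inp Q (y, x)).mp hfr
    have h1 := off_step (sc := sc) (m0 := m0) (inp := inp) (Q := Q) (1, 0) hf ⟨hsh, hpt⟩
    have h2 := off_step (0, 1) hf h1
    have h3 := off_step (-1, 0) hf h2
    have h4 := off_step (0, -1) hf h3
    have e : pvOffsets.foldl (offBody sc inp y x) m =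
        offBody sc inp y x (offBody sc inp y x (offBody sc inp y x
          (offBody sc inp y x m (1, 0)) (0, 1)) (-1, 0)) (0, -1) := by
      simp [pvOffsets, List.foldl]
    rw [e]
    have eq : Q ++ [((y, x), ((1 : Int), (0 : Int)))] ++ [((y, x), ((0 : Int), (1 : Int)))] ++
        [((y, x), ((-1 : Int), (0 : Int)))] ++ [((y, x), ((0 : Int), (-1 : Int)))] =
        Q ++ pairsOf (y, x) := by
      simp [pairsOf, pvOffsets]
    rw [← eq]
    exact h4
  · rw [if_neg hfr]
    have hf : gv m0 y x ≠ sc := by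
      intro h
      apply hfr
      rw [pvCellA_natCast, hpt y x hy hx]
      exact (pval_frontier hsc m0 inp Q (y, x)).mpr h
    refine ⟨hsh, fun y' x' h1 h2 => ?_⟩
    rw [hpt y' x' h1 h2]
    symm
    apply pval_append_eq
    intro p hp
    simp only [pairsOf, pvOffsets, List.map_cons, List.map_nil, List.mem_cons,
      List.not_mem_nil, or_false] at hp
    rcases hp with h | h | h | h <;> subst h <;>
      · rw [Bool.eq_false_iff]
        intro hw
        exact hf (wAt_src hw)

theorem row_aux {sc : Int} {m0 : List (List Int)} {inp : List (List String)} {y : Nat}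
    (hsc : sc ≠ 0) (hy : y < m0.length) :
    ∀ (n : Nat), n ≤ rl m0 y → ∀ {Q m}, LoopInv sc m0 inp Q m →
      LoopInv sc m0 inp (Q ++ (List.range n).flatMap (fun x => pairsOf (y, x)))
        ((List.range n).foldl (fun m2 x => cellBody sc inp y x m2) m) := by
  intro n
  induction n with
  | zero => intro _ Q m h; simpa using h
  | succ k ih =>
    intro hk Q m h
    rw [List.range_succ, List.foldl_append]
    have h2 := cell_step hsc hy (x := k) (by omega) (ih (by omega) h)
    rw [List.flatMap_append, ← List.append_assoc]
    simpa using h2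

theorem row_step {sc : Int} {m0 m : List (List Int)} {inp : List (List String)} {y : Nat}
    {Q : List ((Nat × Nat) × (Int × Int))}
    (hsc : sc ≠ 0) (hy : y < m0.length) (hInv : LoopInv sc m0 inp Q m) :
    LoopInv sc m0 inp (Q ++ (List.range (rl m0 y)).flatMap (fun x => pairsOf (y, x)))
      (rowBody sc inp y m) := by
  unfold rowBody
  have e : (pvRowA m (y : Int)).length = rl m0 y := by
    rw [pvRowA_natCast]; exact hInv.1.2 y
  rw [e]
  exact row_aux hsc hy (rl m0 y) le_rfl hInv

theorem outer_aux {sc : Int} {m0 : List (List Int)} {inp : List (List String)}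
    (hsc : sc ≠ 0) :
    ∀ (n : Nat), n ≤ m0.length → ∀ {Q m}, LoopInv sc m0 inp Q m →
      LoopInv sc m0 inp
        (Q ++ (List.range n).flatMap (fun y => (List.range (rl m0 y)).flatMap (fun x => pairsOf (y, x))))
        ((List.range n).foldl (fun m1 y => rowBody sc inp y m1) m) := by
  intro n
  induction n with
  | zero => intro _ Q m h; simpa using h
  | succ k ih =>
    intro hk Q m h
    rw [List.range_succ, List.foldl_append]
    have h2 := row_step (y := k) hsc (by omega) (ih (by omega) h)
    rw [List.flatMap_append, ← List.append_assoc]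
    simpa using h2

theorem step_inv {sc : Int} (hsc : sc ≠ 0) (m0 : List (List Int)) (inp : List (List String)) :
    LoopInv sc m0 inp (Qall m0) (step sc m0 inp) := by
  have h0 : LoopInv sc m0 inp [] m0 :=
    ⟨⟨rfl, fun _ => rfl⟩, fun y x _ _ => by simp [pval]⟩
  have h := outer_aux hsc m0.length le_rfl h0
  rw [step_eq_folds]
  simpa [Qall] using h

-- ===== B-side characterization =====
theorem map_range_getD {α : Type} (f : Nat → α) (n y : Nat) (d : α) (h : y < n) :
    ((List.range n).map f).getD y d = f y := by
  simp [List.getD_eq_getElem?_getD, h]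

theorem alt_length (sc : Int) (m : List (List Int)) (inp : List (List String)) :
    (step_alt sc m inp).length = m.length := by
  simp [step_alt]

theorem mem_Qall {m0 : List (List Int)} {p : (Nat × Nat) × (Int × Int)} :
    p ∈ Qall m0 ↔ p.1.1 < m0.length ∧ p.1.2 < rl m0 p.1.1 ∧ p.2 ∈ pvOffsets := by
  rcases p with ⟨⟨a, b⟩, o⟩
  simp only [Qall, pairsOf, List.mem_flatMap, List.mem_range, List.mem_map]
  constructor
  · rintro ⟨a', ha', b', hb', o', ho', e⟩
    obtain ⟨⟨rfl, rfl⟩, rfl⟩ : (a' = a ∧ b' = b) ∧ o' = o := by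
      simpa [Prod.ext_iff] using e
    exact ⟨ha', hb', ho'⟩
  · rintro ⟨ha, hb, ho⟩
    exact ⟨a, ha, b, hb, o, ho, rfl⟩

theorem neg_mem_offsets {o : Int × Int} (h : o ∈ pvOffsets) : (-o.1, -o.2) ∈ pvOffsets := by
  fin_cases h <;> simp [pvOffsets]

theorem off_shape {o : Int × Int} (h : o ∈ pvOffsets) : o.1 = 0 ∨ o.2 = 0 := by
  fin_cases h <;> simp

theorem wAt_intro {sc : Int} {m0 : List (List Int)} {inp : List (List String)}
    {dy dx : Nat} {o : Int × Int} {cy cx : Nat}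
    (h1 : gv m0 dy dx = sc) (h2 : (dy : Int) + o.1 = (cy : Int)) (h3 : (dx : Int) + o.2 = (cx : Int))
    (h4 : cy < m0.length) (h5 : cx < rl m0 dy) (h6 : elevOK inp cy cx dy dx = true) :
    wAt sc m0 inp ((dy, dx), o) (cy, cx) = true := by
  unfold wAt
  simp only [Bool.and_eq_true, beq_iff_eq, decide_eq_true_eq]
  exact ⟨⟨⟨⟨⟨h1, h2⟩, h3⟩, h4⟩, by exact_mod_cast h5⟩, h6⟩

-- the pulled neighbour test of B fires at an in-range cell exactly when some pair of A's pass writes there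
theorem alt_any_iff {sc : Int} {m0 : List (List Int)} {inp : List (List String)} {y x : Nat}
    (hy : y < m0.length) (hx : x < rl m0 y) :
    (pvOffsets.any (fun off =>
        decide (0 ≤ (y : Int) + off.1) && decide ((y : Int) + off.1 < (m0.length : Int)) &&
        decide (0 ≤ (x : Int) + off.2) &&
        decide ((x : Int) + off.2 < ((m0.getD ((y : Int) + off.1).toNat []).length : Int)) &&
        decide ((m0.getD ((y : Int) + off.1).toNat []).getD ((x : Int) + off.2).toNat 0 = sc) &&
        decide (PySem.Str.find pvAlpha (pvStrB inp y x) -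
                PySem.Str.find pvAlpha (pvStrB inp ((y : Int) + off.1).toNat ((x : Int) + off.2).toNat) ≤ 1)) = true) ↔
    ((Qall m0).any (fun p => wAt sc m0 inp p (y, x)) = true) := by
  constructor
  · intro h
    simp only [List.any_eq_true] at h ⊢
    obtain ⟨off, hoff, hcond⟩ := h
    simp only [Bool.and_eq_true, decide_eq_true_eq] at hcond
    obtain ⟨⟨⟨⟨⟨c1, c2⟩, c3⟩, c4⟩, c5⟩, c6⟩ := hcond
    set a : Nat := ((y : Int) + off.1).toNat with hadef
    set b : Nat := ((x : Int) + off.2).toNat with hbdef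
    have ha : a < m0.length := by omega
    have hb : b < rl m0 a := by
      have : ((x : Int) + off.2) < (rl m0 a : Int) := c4
      omega
    refine ⟨((a, b), (-off.1, -off.2)), mem_Qall.mpr ⟨ha, hb, neg_mem_offsets hoff⟩, ?_⟩
    apply wAt_intro
    · exact c5
    · show (a : Int) + (-off.1) = (y : Int); omega
    · show (b : Int) + (-off.2) = (x : Int); omega
    · exact hy
    · rcases off_shape hoff with h0 | h0
      · have ea : a = y := by omega
        rw [ea]; exact hx
      · have eb : b = x := by omega
        rw [← eb]; exact hb
    · unfold elevOK
      rw [pvStrB_eq_gs, pvStrB_eq_gs] at c6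
      exact decide_eq_true c6
  · intro h
    simp only [List.any_eq_true] at h ⊢
    obtain ⟨p, hp, hw⟩ := h
    rcases p with ⟨⟨a, b⟩, o⟩
    obtain ⟨ha, hb, ho⟩ := mem_Qall.mp hp
    dsimp only at ha hb ho
    obtain ⟨hf, e1, e2, _, h5, hel⟩ := wAt_parts hw
    dsimp only at hf e1 e2 h5 hel
    refine ⟨(-o.1, -o.2), neg_mem_offsets ho, ?_⟩
    have ea : ((y : Int) + -o.1).toNat = a := by omega
    have eb : ((x : Int) + -o.2).toNat = b := by omega
    simp only [Bool.and_eq_true, decide_eq_true_eq, ea, eb]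
    refine ⟨⟨⟨⟨⟨by omega, by omega⟩, by omega⟩, ?_⟩, hf⟩, ?_⟩
    · show ((x : Int) + -o.2) < (rl m0 a : Int)
      omega
    · rw [pvStrB_eq_gs, pvStrB_eq_gs]
      unfold elevOK at hel
      exact of_decide_eq_true hel

theorem alt_row (sc : Int) (m : List (List Int)) (inp : List (List String)) (y : Nat)
    (hy : y < m.length) :
    (step_alt sc m inp).getD y [] =
      (List.range (rl m y)).map (fun x =>
        if (m.getD y []).getD x 0 = 0 ∧ (pvOffsets.any (fun off =>
            decide (0 ≤ (y : Int) + off.1) && decide ((y : Int) + off.1 < (m.length : Int)) &&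
            decide (0 ≤ (x : Int) + off.2) &&
            decide ((x : Int) + off.2 < ((m.getD ((y : Int) + off.1).toNat []).length : Int)) &&
            decide ((m.getD ((y : Int) + off.1).toNat []).getD ((x : Int) + off.2).toNat 0 = sc) &&
            decide (PySem.Str.find pvAlpha (pvStrB inp y x) -
                    PySem.Str.find pvAlpha (pvStrB inp ((y : Int) + off.1).toNat ((x : Int) + off.2).toNat) ≤ 1)) = true)
        then sc + 1 else (m.getD y []).getD x 0) := by
  unfold step_alt
  rw [map_range_getD _ _ _ _ hy]
  rfl

theorem alt_rl (sc : Int) (m : List (List Int)) (inp : List (List String)) (y : Nat)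
    (hy : y < m.length) : rl (step_alt sc m inp) y = rl m y := by
  unfold rl
  rw [alt_row sc m inp y hy]
  simp [rl, List.getD_eq_getElem?_getD]

theorem alt_gv {sc : Int} (m : List (List Int)) (inp : List (List String)) {y x : Nat}
    (hy : y < m.length) (hx : x < rl m y) :
    gv (step_alt sc m inp) y x = pval sc m inp (Qall m) (y, x) := by
  unfold gv
  rw [alt_row sc m inp y hy, map_range_getD _ _ _ _ hx]
  unfold pval
  rcases (alt_any_iff (sc := sc) (inp := inp) hy hx) with ⟨f1, f2⟩
  by_cases hg : (m.getD y []).getD x 0 = 0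
  · by_cases hany : ((Qall m).any (fun p => wAt sc m inp p (y, x))) = true
    · rw [if_pos ⟨hg, f2 hany⟩, if_pos ⟨hg, hany⟩]
    · rw [if_neg (fun hc => hany (f1 hc.2)), if_neg (fun hc => hany hc.2)]
      rfl
  · rw [if_neg (fun hc => hg hc.1), if_neg (fun hc => hg hc.1)]
    rfl

-- reading entries of a list of lists
theorem getElem_eq_gv (X : List (List Int)) (i j : Nat) (hi : i < X.length)
    (hj : j < X[i].length) : X[i][j] = gv X i j := by
  unfold gv
  have e1 : X.getD i [] = X[i] := List.getD_eq_getElem X [] hi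
  rw [e1, List.getD_eq_getElem X[i] 0 hj]

theorem rl_eq_length (X : List (List Int)) (i : Nat) (hi : i < X.length) :
    X[i].length = rl X i := by
  unfold rl
  rw [List.getD_eq_getElem X [] hi]



-- ===== VERDICT (by name: the statement is the Claim_ definition above) =====
theorem step_spec : Claim_equal_step := by
  intro sc m inp _ hpre
  obtain ⟨hsc, -⟩ := hpre
  show step sc m inp = step_alt sc m inp
  obtain ⟨⟨hlen, hrl⟩, hpt⟩ := step_inv hsc m inp
  apply List.ext_getElem
  · rw [hlen, alt_length]
  · intro i h1 h2
    have him : i < m.length := by rw [hlen] at h1; exact h1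
    apply List.ext_getElem
    · rw [rl_eq_length _ _ h1, rl_eq_length _ _ h2, hrl, alt_rl sc m inp i him]
    · intro j hj1 hj2
      have hjr : j < rl m i := by
        rw [rl_eq_length _ _ h1, hrl] at hj1; exact hj1
      rw [getElem_eq_gv _ _ _ h1 hj1, getElem_eq_gv _ _ _ h2 hj2,
          hpt i j him hjr, alt_gv m inp him hjr]
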